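-- pv_equiv track=rewrite | github.com/Ic4r0/advent_of_code2016 | days/day_2.py | part_2
-- ===== SOURCE A (Python) =====
-- def part_2(input_list: list) -> str:
--     """ Code for the 2nd part of the 2nd day of Advent of Code
--
--     :param input_list: input list
--     :return: string result
--     """
--     current_button = 5
--     password_sequence = ''
--     replace_value = {
--         10: 'A',
--         11: 'B',
--         12: 'C',
--         13: 'D'
--     }
--     for password_digit in input_list:
--         for instruction in password_digit:
--             match instruction:
--                 case 'L':
--                     if current_button not in [1, 2, 5, 10, 13]:
--                         current_button -= 1
--                 case 'U':
--                     if current_button not in [1, 2, 4, 5, 9] and current_button in [3, 13]: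
--                         current_button -= 2
--                     elif current_button not in [1, 2, 4, 5, 9]:
--                         current_button -= 4
--                 case 'R':
--                     if current_button not in [1, 4, 9, 12, 13]:
--                         current_button += 1
--                 case 'D':
--                     if current_button not in [5, 9, 10, 12, 13] and current_button in [1, 11]:
--                         current_button += 2
--                     elif current_button not in [5, 9, 10, 12, 13]:
--                         current_button += 4
--         password_sequence += replace_value.get(current_button, str(current_button))
--     return password_sequence
-- ===== SOURCE B (Python) =====
-- def part_2(input_list: list) -> str:
--     grid = {(0, 2): '1',
--             (1, 1): '2', (1, 2): '3', (1, 3): '4',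
--             (2, 0): '5', (2, 1): '6', (2, 2): '7', (2, 3): '8', (2, 4): '9',
--             (3, 1): 'A', (3, 2): 'B', (3, 3): 'C',
--             (4, 2): 'D'}
--     delta = {'L': (0, -1), 'R': (0, 1), 'U': (-1, 0), 'D': (1, 0)}
--     pos = (2, 0)
--     out = []
--     for line in input_list:
--         for instruction in line:
--             dr, dc = delta.get(instruction, (0, 0))
--             cand = (pos[0] + dr, pos[1] + dc)
--             if cand in grid:
--                 pos = cand
--         out.append(grid[pos])
--     return ''.join(out)
-- ===== Notes on version B (the rewrite author's own statement) =====
-- stated objective: idiomatic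
-- what changed: B replaces A's per-direction hand-written legality lists and numeric button arithmetic by a coordinate grid dict plus direction deltas: a move is taken iff the candidate cell is a key of the grid, and the password character is read off the grid.
import Mathlib
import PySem

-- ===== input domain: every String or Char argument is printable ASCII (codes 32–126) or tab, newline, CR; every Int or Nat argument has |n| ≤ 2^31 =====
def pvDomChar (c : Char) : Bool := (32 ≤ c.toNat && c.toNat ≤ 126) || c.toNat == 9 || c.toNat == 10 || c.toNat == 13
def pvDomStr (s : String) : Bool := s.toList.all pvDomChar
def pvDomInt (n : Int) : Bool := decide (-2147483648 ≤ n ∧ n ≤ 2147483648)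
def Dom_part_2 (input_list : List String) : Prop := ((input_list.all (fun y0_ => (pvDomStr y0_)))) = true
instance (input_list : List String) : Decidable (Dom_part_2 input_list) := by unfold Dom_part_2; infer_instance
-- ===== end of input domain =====

-- B replaces A's hand-written per-button legality lists by a coordinate grid dict plus
-- direction deltas (move iff the candidate cell is on the pad): idiomatic, no speed claim.

-- ===== PORT A =====
-- replace_value dict of A
def pvReplace : PySem.Dict Int String :=
  PySem.Dict.ofList [(10, "A"), (11, "B"), (12, "C"), (13, "D")]

-- the body of A's inner 'for instruction in password_digit' loop (match, branches in order)
def pvAStep (cb : Int) (instruction : Char) : Int :=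
  if instruction = 'L' then
    if ¬ (cb ∈ ([1, 2, 5, 10, 13] : List Int)) then cb - 1 else cb
  else if instruction = 'U' then
    if ¬ (cb ∈ ([1, 2, 4, 5, 9] : List Int)) ∧ cb ∈ ([3, 13] : List Int) then cb - 2
    else if ¬ (cb ∈ ([1, 2, 4, 5, 9] : List Int)) then cb - 4
    else cb
  else if instruction = 'R' then
    if ¬ (cb ∈ ([1, 4, 9, 12, 13] : List Int)) then cb + 1 else cb
  else if instruction = 'D' then
    if ¬ (cb ∈ ([5, 9, 10, 12, 13] : List Int)) ∧ cb ∈ ([1, 11] : List Int) then cb + 2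
    else if ¬ (cb ∈ ([5, 9, 10, 12, 13] : List Int)) then cb + 4
    else cb
  else cb

def part_2 (input_list : List String) : String :=
  (input_list.foldl
    (fun (st : Int × String) password_digit =>
      let cb := password_digit.toList.foldl pvAStep st.1
      (cb, st.2 ++ PySem.Dict.getD pvReplace cb (PySem.Int.toStr cb)))
    (5, "")).2

-- ===== PORT B =====
def pvGrid : PySem.Dict (Int × Int) String :=
  PySem.Dict.ofList
    [((0, 2), "1"),
     ((1, 1), "2"), ((1, 2), "3"), ((1, 3), "4"),
     ((2, 0), "5"), ((2, 1), "6"), ((2, 2), "7"), ((2, 3), "8"), ((2, 4), "9"),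
     ((3, 1), "A"), ((3, 2), "B"), ((3, 3), "C"),
     ((4, 2), "D")]

def pvDelta : PySem.Dict Char (Int × Int) :=
  PySem.Dict.ofList [('L', (0, -1)), ('R', (0, 1)), ('U', (-1, 0)), ('D', (1, 0))]

-- body of Source B's inner loop; move only if the candidate cell is a key of the grid
def pvBStep (pos : Int × Int) (instruction : Char) : Int × Int :=
  let d := PySem.Dict.getD pvDelta instruction (0, 0)
  let cand := (pos.1 + d.1, pos.2 + d.2)
  if PySem.Dict.contains pvGrid cand then cand else pos

-- Source B's grid[pos]: pos is always a key of the grid, so getD with "" is exact there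
def part_2_alt (input_list : List String) : String :=
  PySem.Str.join ""
    ((input_list.foldl
      (fun (st : (Int × Int) × List String) line =>
        let pos := line.toList.foldl pvBStep st.1
        (pos, st.2 ++ [PySem.Dict.getD pvGrid pos ""]))
      ((2, 0), [])).2)

-- ===== PRECONDITION & SPEC =====
def Spec_part_2 (input_list : List String) (out : String) : Prop := out = part_2_alt input_list
instance (input_list : List String) (out : String) : Decidable (Spec_part_2 input_list out) := by unfold Spec_part_2; infer_instance

-- ===== CLAIM (what is proved, stated in full; the proofs are below) =====
def Claim_equal_part_2 : Prop := ∀ (input_list : List String), Dom_part_2 input_list → Spec_part_2 input_list (part_2 input_list)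

-- ===== LEMMAS AND PROOFS =====

-- the 13 buttons of A
def pvButtons : List Int := [1, 2, 3, 4, 5, 6, 7, 8, 9, 10, 11, 12, 13]

-- A's button number ↦ B's grid coordinate
def pvCoord (cb : Int) : Int × Int :=
  if cb = 1 then (0, 2)
  else if cb = 2 then (1, 1) else if cb = 3 then (1, 2) else if cb = 4 then (1, 3)
  else if cb = 5 then (2, 0) else if cb = 6 then (2, 1) else if cb = 7 then (2, 2)
  else if cb = 8 then (2, 3) else if cb = 9 then (2, 4)
  else if cb = 10 then (3, 1) else if cb = 11 then (3, 2) else if cb = 12 then (3, 3)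
  else (4, 2)

theorem pvStep_sim (cb : Int) (h : cb ∈ pvButtons) (c : Char) :
    pvAStep cb c ∈ pvButtons ∧ pvBStep (pvCoord cb) c = pvCoord (pvAStep cb c) := by
  by_cases hL : c = 'L'
  · subst hL; fin_cases h <;> decide
  by_cases hU : c = 'U'
  · subst hU; fin_cases h <;> decide
  by_cases hR : c = 'R'
  · subst hR; fin_cases h <;> decide
  by_cases hD : c = 'D'
  · subst hD; fin_cases h <;> decide
  · constructor
    · simpa [pvAStep, hL, hU, hR, hD] using h
    · simp [pvAStep, pvBStep, pvDelta, PySem.Dict.ofList, PySem.Dict.update,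
        PySem.Dict.getD_insert, PySem.Dict.getD_empty, hL, hU, hR, hD]

theorem pvLine_sim (cs : List Char) (cb : Int) (h : cb ∈ pvButtons) :
    cs.foldl pvAStep cb ∈ pvButtons ∧
    cs.foldl pvBStep (pvCoord cb) = pvCoord (cs.foldl pvAStep cb) := by
  induction cs generalizing cb with
  | nil => exact ⟨h, rfl⟩
  | cons c cs ih =>
    obtain ⟨h1, h2⟩ := pvStep_sim cb h c
    simpa [h2] using ih (pvAStep cb c) h1

theorem pvEntry_eq (cb : Int) (h : cb ∈ pvButtons) :
    PySem.Dict.getD pvGrid (pvCoord cb) "" =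
    PySem.Dict.getD pvReplace cb (PySem.Int.toStr cb) := by
  fin_cases h <;> decide

theorem pvFlat_intersperse_nil {α : Type} (xs : List (List α)) :
    (List.intersperse [] xs).flatten = xs.flatten := by
  induction xs with
  | nil => rfl
  | cons a xs ih => cases xs <;> simp_all [List.intersperse]

theorem pvJoin_append (l : List String) (s : String) :
    PySem.Str.join "" (l ++ [s]) = PySem.Str.join "" l ++ s := by
  simp [PySem.Str.join, PySem.Chars.join, List.intercalate, pvFlat_intersperse_nil,
    List.flatten_append, String.ofList_append]

theorem pvFold_sim (ls : List String) (cb : Int) (acc : String) (out : List String)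
    (h : cb ∈ pvButtons) (hacc : acc = PySem.Str.join "" out) :
    (ls.foldl
      (fun (st : Int × String) password_digit =>
        let c := password_digit.toList.foldl pvAStep st.1
        (c, st.2 ++ PySem.Dict.getD pvReplace c (PySem.Int.toStr c))) (cb, acc)).2 =
    PySem.Str.join ""
      ((ls.foldl
        (fun (st : (Int × Int) × List String) line =>
          let pos := line.toList.foldl pvBStep st.1
          (pos, st.2 ++ [PySem.Dict.getD pvGrid pos ""])) (pvCoord cb, out)).2) := by
  induction ls generalizing cb acc out with
  | nil => simpa using hacc
  | cons l ls ih =>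
    obtain ⟨h1, h2⟩ := pvLine_sim l.toList cb h
    simp only [List.foldl_cons, h2]
    exact ih _ _ _ h1 (by
      rw [hacc, pvJoin_append, pvEntry_eq _ h1])

-- ===== VERDICT (by name: the statement is the Claim_ definition above) =====
theorem part_2_spec : Claim_equal_part_2 := by
  intro input_list _
  unfold Spec_part_2 part_2 part_2_alt
  exact pvFold_sim input_list 5 "" [] (by decide) rfl
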